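-- pv_equiv track=rewrite | github.com/lllftd/futuopend | options/futu_options_data.py | _preferred_history_order
-- ===== SOURCE A (Python) =====
-- from typing import Any
--
-- def _preferred_history_order(columns: list[str] | Any) -> list[str]:
--     preferred = [
--         "underlying",
--         "option_code",
--         "code",
--         "name",
--         "expiry",
--         "option_type",
--         "strike_price",
--         "time_key",
--         "open",
--         "high",
--         "low",
--         "close",
--         "volume",
--         "turnover",
--         "change_rate",
--         "last_close",
--     ]
--     present = list(columns)
--     ordered = [column for column in preferred if column in present]
--     ordered.extend(column for column in present if column not in ordered)
--     return ordered
-- ===== SOURCE B (Python) =====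
-- def _preferred_history_order(columns):
--     preferred = [
--         "underlying",
--         "option_code",
--         "code",
--         "name",
--         "expiry",
--         "option_type",
--         "strike_price",
--         "time_key",
--         "open",
--         "high",
--         "low",
--         "close",
--         "volume",
--         "turnover",
--         "change_rate",
--         "last_close",
--     ]
--     rank = {column: index for index, column in enumerate(preferred)}
--     n = len(preferred)
--     buckets = [[] for _ in range(n + 1)]
--     seen = set()
--     for column in columns:
--         if column in seen:
--             continue
--         seen.add(column)
--         buckets[rank.get(column, n)].append(column)
--     out = []
--     for bucket in buckets:
--         out.extend(bucket)
--     return out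
-- ===== Notes on version B (the rewrite author's own statement) =====
-- stated objective: faster
-- what changed: Replaces the two membership-scan passes (preferred filtered by a linear scan of present, then a growing-list 'not in ordered' scan per column) with a one-pass bucket sort: a rank dict maps each column to its bucket, a seen-set deduplicates in O(1), and the buckets are concatenated.
import Mathlib
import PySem

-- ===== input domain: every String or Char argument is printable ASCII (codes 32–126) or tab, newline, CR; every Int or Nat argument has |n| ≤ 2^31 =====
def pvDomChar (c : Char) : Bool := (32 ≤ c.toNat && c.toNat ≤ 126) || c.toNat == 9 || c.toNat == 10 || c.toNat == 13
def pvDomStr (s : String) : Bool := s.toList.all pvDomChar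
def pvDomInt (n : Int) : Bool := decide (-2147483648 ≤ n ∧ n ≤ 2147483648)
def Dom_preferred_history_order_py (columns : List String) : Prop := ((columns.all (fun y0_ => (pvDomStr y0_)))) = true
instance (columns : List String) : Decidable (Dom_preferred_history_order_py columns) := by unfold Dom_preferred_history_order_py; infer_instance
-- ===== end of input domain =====

-- B replaces A's two membership-scan passes (including the growing-list 'not in ordered' test) with a
-- one-pass bucket sort keyed by a rank dict plus a seen-set; same return value, proved equivalent.

-- the fixed preferred-column list (shared data of both ports)
def pvPreferred : List String :=
  ["underlying","option_code","code","name","expiry","option_type","strike_price","time_key",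
   "open","high","low","close","volume","turnover","change_rate","last_close"]

-- ===== PORT A =====
def preferred_history_order_py (columns : List String) : List String :=
  let preferred := pvPreferred
  let present := columns
  let ordered := preferred.filter (fun column => present.contains column)
  -- ordered.extend(column for column in present if column not in ordered): the generator sees the
  -- growing list, so each appended column is also checked against everything appended before it
  present.foldl (fun ordered column => if ordered.contains column then ordered else ordered ++ [column]) ordered

-- ===== PORT B =====
def preferred_history_order_py_alt (columns : List String) : List String :=
  let preferred := pvPreferred
  let rank : PySem.Dict String Int :=
    (PySem.List.enumerate preferred).foldl (fun d p => d.insert p.2 p.1) PySem.Dict.empty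
  let n := preferred.length
  let buckets : List (List String) := List.replicate (n + 1) []
  let st := columns.foldl
    (fun (st : PySem.Set String × List (List String)) column =>
      if PySem.Set.contains st.1 column then st
      else (PySem.Set.add st.1 column,
            -- buckets[rank.get(column, n)].append(column): the index is always in [0, n], so toNat is exact
            st.2.modify ((rank.getD column (n : Int)).toNat) (fun b => b ++ [column])))
    (PySem.Set.empty, buckets)
  st.2.foldl (fun out bucket => out ++ bucket) []

-- ===== PRECONDITION & SPEC =====
def Spec_preferred_history_order_py (columns : List String) (out : List String) : Prop := out = preferred_history_order_py_alt columns
instance (columns : List String) (out : List String) : Decidable (Spec_preferred_history_order_py columns out) := by unfold Spec_preferred_history_order_py; infer_instance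

-- ===== CLAIM (what is proved, stated in full; the proofs are below) =====
def Claim_equal_preferred_history_order_py : Prop := ∀ (columns : List String), Dom_preferred_history_order_py columns → Spec_preferred_history_order_py columns (preferred_history_order_py columns)

-- ===== LEMMAS AND PROOFS =====

-- B's rank dict, and its lookup as a function on a column name (the bucket index)
def pvRank : PySem.Dict String Int :=
  (PySem.List.enumerate pvPreferred).foldl (fun d p => d.insert p.2 p.1) PySem.Dict.empty

def rkFun (c : String) : Nat := (pvRank.getD c (16 : Int)).toNat

lemma pvRank_items : pvRank.items = [("underlying",0),("option_code",1),("code",2),("name",3),("expiry",4),("option_type",5),("strike_price",6),("time_key",7),("open",8),("high",9),("low",10),("close",11),("volume",12),("turnover",13),("change_rate",14),("last_close",15)] := by rfl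

lemma pvRank_keys : pvRank.keys = PySem.Set.ofList pvPreferred := by rfl

lemma rk_lt (c : String) : rkFun c < 17 := by
  unfold rkFun
  cases hv : pvRank.get? c with
  | none => simp [PySem.Dict.getD, hv]
  | some v =>
    have hm := PySem.Dict.mem_items_of_get?_eq_some _ hv
    rw [pvRank_items] at hm
    simp only [List.mem_cons, List.not_mem_nil, or_false, Prod.mk.injEq] at hm
    simp only [PySem.Dict.getD, hv, Option.getD_some]
    rcases hm with ⟨rfl,rfl⟩|⟨rfl,rfl⟩|⟨rfl,rfl⟩|⟨rfl,rfl⟩|⟨rfl,rfl⟩|⟨rfl,rfl⟩|⟨rfl,rfl⟩|⟨rfl,rfl⟩|⟨rfl,rfl⟩|⟨rfl,rfl⟩|⟨rfl,rfl⟩|⟨rfl,rfl⟩|⟨rfl,rfl⟩|⟨rfl,rfl⟩|⟨rfl,rfl⟩|⟨rfl,rfl⟩ <;> decide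

lemma rk_inv (c : String) (i : Nat) (hi : i < 16) (h : rkFun c = i) : c = pvPreferred.getD i "" := by
  unfold rkFun at h
  cases hv : pvRank.get? c with
  | none => rw [PySem.Dict.getD_eq_get?_getD, hv] at h; simp at h; omega
  | some v =>
    rw [PySem.Dict.getD_eq_get?_getD, hv] at h
    simp only [Option.getD_some] at h
    have hm := PySem.Dict.mem_items_of_get?_eq_some _ hv
    rw [pvRank_items] at hm
    simp only [List.mem_cons, List.not_mem_nil, or_false, Prod.mk.injEq] at hm
    rcases hm with ⟨rfl,rfl⟩|⟨rfl,rfl⟩|⟨rfl,rfl⟩|⟨rfl,rfl⟩|⟨rfl,rfl⟩|⟨rfl,rfl⟩|⟨rfl,rfl⟩|⟨rfl,rfl⟩|⟨rfl,rfl⟩|⟨rfl,rfl⟩|⟨rfl,rfl⟩|⟨rfl,rfl⟩|⟨rfl,rfl⟩|⟨rfl,rfl⟩|⟨rfl,rfl⟩|⟨rfl,rfl⟩ <;> (simp at h; subst h; rfl)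

lemma rk_getD (i : Nat) (hi : i < 16) : rkFun (pvPreferred.getD i "") = i := by
  interval_cases i <;> rfl

lemma rk_eq16_iff (c : String) : rkFun c = 16 ↔ c ∉ pvPreferred := by
  constructor
  · intro h hmem
    fin_cases hmem <;> revert h <;> decide
  · intro hmem
    have hcon : pvRank.contains c = false := by
      rw [PySem.Dict.contains_eq_decide_mem_keys, pvRank_keys]
      simp [PySem.Set.mem_ofList, hmem]
    have hnone : pvRank.get? c = none := by
      cases hg : pvRank.get? c with
      | none => rfl
      | some v => rw [PySem.Dict.contains_eq_isSome_get?, hg] at hcon; simp at hcon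
    unfold rkFun
    rw [PySem.Dict.getD_eq_get?_getD, hnone]
    rfl

-- first-occurrence dedup relative to an already-seen set, structurally
def dd (seen : PySem.Set String) : List String → List String
  | [] => []
  | c :: cs => if PySem.Set.contains seen c then dd seen cs else c :: dd (PySem.Set.add seen c) cs

lemma update_eq_dd (xs : List String) : ∀ (seen : PySem.Set String),
    xs.foldl PySem.Set.add seen = seen ++ dd seen xs := by
  induction xs with
  | nil => intro seen; simp [dd]
  | cons c cs ih =>
    intro seen
    simp only [List.foldl_cons, dd]
    by_cases h : PySem.Set.contains seen c
    · have hadd : PySem.Set.add seen c = seen := by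
        simp [PySem.Set.add, PySem.Set.contains] at h ⊢; simp [h]
      rw [hadd, if_pos h, ih seen]
    · have hadd : PySem.Set.add seen c = seen ++ [c] := by
        simp [PySem.Set.add, PySem.Set.contains] at h ⊢; simp [h]
      rw [hadd, if_neg h, ← hadd, hadd, ih (seen ++ [c])]
      simp

-- what A's second pass appends: unseen columns, preferred ones skipped (already in ordered)
def npDedup (seen : PySem.Set String) : List String → List String
  | [] => []
  | c :: cs =>
    if PySem.Set.contains seen c then npDedup seen cs
    else if pvPreferred.contains c then npDedup (PySem.Set.add seen c) cs
    else c :: npDedup (PySem.Set.add seen c) cs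

lemma npDedup_eq_filter_dd (xs : List String) : ∀ (seen : PySem.Set String),
    npDedup seen xs = (dd seen xs).filter (fun c => !pvPreferred.contains c) := by
  induction xs with
  | nil => intro seen; simp [dd, npDedup]
  | cons c cs ih =>
    intro seen
    simp only [dd, npDedup]
    by_cases h1 : PySem.Set.contains seen c
    · simp only [if_pos h1]; exact ih seen
    · simp only [if_neg h1]
      by_cases h2 : pvPreferred.contains c
      · simp [List.filter_cons, h2, ih (PySem.Set.add seen c)]
      · simp [List.filter_cons, h2, ih (PySem.Set.add seen c)]

-- A's second pass, characterised: it appends exactly npDedup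
lemma foldA (xs : List String) : ∀ (acc : List String) (seen : PySem.Set String),
    (∀ c ∈ xs, (c ∈ acc ↔ c ∈ pvPreferred ∨ c ∈ seen)) →
    xs.foldl (fun ordered column => if ordered.contains column then ordered else ordered ++ [column]) acc
      = acc ++ npDedup seen xs := by
  induction xs with
  | nil => intro acc seen _; simp [npDedup]
  | cons c cs ih =>
    intro acc seen hacc
    have hc := hacc c (by simp)
    simp only [List.foldl_cons, npDedup]
    by_cases h1 : c ∈ seen
    · have e1 : PySem.Set.contains seen c = true := by
        simp [PySem.Set.contains, h1]
      have e2 : acc.contains c = true := by simp [hc.mpr (Or.inr h1)]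
      rw [if_pos e2, if_pos e1]
      exact ih acc seen (fun c' hc' => hacc c' (by simp [hc']))
    · have e1 : ¬ (PySem.Set.contains seen c = true) := by
        simp [PySem.Set.contains, h1]
      have hmem_add : ∀ c', c' ∈ PySem.Set.add seen c ↔ c' ∈ seen ∨ c' = c := by
        intro c'
        have hadd : PySem.Set.add seen c = seen ++ [c] := by
          simp [PySem.Set.add, PySem.Set.contains, h1]
        rw [hadd]; simp
      by_cases h2 : c ∈ pvPreferred
      · have e2 : acc.contains c = true := by simp [hc.mpr (Or.inl h2)]
        have e3 : pvPreferred.contains c = true := by simp [h2]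
        rw [if_pos e2, if_neg e1, if_pos e3]
        apply ih acc (PySem.Set.add seen c)
        intro c' hc'
        rw [hmem_add c']
        have h' := hacc c' (by simp [hc'])
        constructor
        · intro hmem
          rcases h'.mp hmem with hp | hs
          · exact Or.inl hp
          · exact Or.inr (Or.inl hs)
        · rintro (hp | hs | rfl)
          · exact h'.mpr (Or.inl hp)
          · exact h'.mpr (Or.inr hs)
          · exact hc.mpr (Or.inl h2)
      · have e2 : ¬ (acc.contains c = true) := by
          simp [hc, h1, h2]
        have e3 : ¬ (pvPreferred.contains c = true) := by simp [h2]
        rw [if_neg e2, if_neg e1, if_neg e3]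
        rw [ih (acc ++ [c]) (PySem.Set.add seen c) ?_]
        · simp
        · intro c' hc'
          rw [hmem_add c']
          have h' := hacc c' (by simp [hc'])
          simp only [List.mem_append, List.mem_singleton]
          constructor
          · rintro (hmem | rfl)
            · rcases h'.mp hmem with hp | hs
              · exact Or.inl hp
              · exact Or.inr (Or.inl hs)
            · exact Or.inr (Or.inr rfl)
          · rintro (hp | hs | rfl)
            · exact Or.inl (h'.mpr (Or.inl hp))
            · exact Or.inl (h'.mpr (Or.inr hs))
            · exact Or.inr rfl

-- B's buckets after processing a prefix of the columns
def bucketsSpec (pre : List String) : List (List String) :=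
  (List.range 17).map (fun i => (PySem.Set.ofList pre).filter (fun c => decide (rkFun c = i)))

lemma mapRange_modify {α : Type} (m k : Nat) (g : Nat → α) (f : α → α) (hk : k < m) :
    ((List.range m).map g).modify k f = (List.range m).map (fun i => if i = k then f (g i) else g i) := by
  apply List.ext_getElem
  · simp
  · intro j h1 h2
    simp only [List.getElem_modify, List.getElem_map, List.getElem_range]
    by_cases hj : j = k
    · simp [hj]
    · simp [hj, Ne.symm hj]

lemma foldB_inv (xs : List String) : ∀ (pre : List String),
    xs.foldl
      (fun (st : PySem.Set String × List (List String)) column =>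
        if PySem.Set.contains st.1 column then st
        else (PySem.Set.add st.1 column,
              st.2.modify (rkFun column) (fun b => b ++ [column])))
      (PySem.Set.ofList pre, bucketsSpec pre)
      = (PySem.Set.ofList (pre ++ xs), bucketsSpec (pre ++ xs)) := by
  induction xs with
  | nil => intro pre; simp
  | cons c cs ih =>
    intro pre
    have hof : PySem.Set.ofList (pre ++ [c]) = PySem.Set.add (PySem.Set.ofList pre) c := by
      rw [PySem.Set.ofList_eq_foldl (pre ++ [c]), List.foldl_append, ← PySem.Set.ofList_eq_foldl]
      rfl
    simp only [List.foldl_cons]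
    by_cases h : PySem.Set.contains (PySem.Set.ofList pre) c = true
    · have e1 : PySem.Set.ofList (pre ++ [c]) = PySem.Set.ofList pre := by
        rw [hof]
        simp only [PySem.Set.add]
        rw [if_pos h]
      have e2 : bucketsSpec (pre ++ [c]) = bucketsSpec pre := by
        unfold bucketsSpec; rw [e1]
      rw [if_pos h]
      have hs := ih (pre ++ [c])
      rw [e1, e2] at hs
      rw [hs]
      simp
    · have e1 : PySem.Set.ofList (pre ++ [c]) = PySem.Set.ofList pre ++ [c] := by
        rw [hof]
        simp only [PySem.Set.add]
        rw [if_neg h]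
      have e2 : (bucketsSpec pre).modify (rkFun c) (fun b => b ++ [c]) = bucketsSpec (pre ++ [c]) := by
        unfold bucketsSpec
        rw [mapRange_modify 17 (rkFun c) _ _ (rk_lt c)]
        apply List.map_congr_left
        intro i hi
        rw [e1, List.filter_append]
        by_cases hik : i = rkFun c
        · subst hik; simp
        · have hd : decide (rkFun c = i) = false := by simp [Ne.symm hik]
          simp [hd, hik]
      rw [if_neg h, e2,
          show PySem.Set.add (PySem.Set.ofList pre) c = PySem.Set.ofList (pre ++ [c]) from hof.symm]
      have hs := ih (pre ++ [c])
      simpa using hs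

lemma filter_beq_of_nodup (l : List String) (hl : l.Nodup) (a : String) :
    l.filter (fun c => c == a) = if a ∈ l then [a] else [] := by
  rw [List.filter_beq]
  by_cases hmem : a ∈ l
  · rw [List.count_eq_one_of_mem hl hmem]
    simp [hmem]
  · rw [List.count_eq_zero.mpr hmem]
    simp [hmem]

lemma flatten_buckets (columns : List String) :
    (bucketsSpec columns).flatten
      = pvPreferred.filter (fun column => columns.contains column)
        ++ npDedup PySem.Set.empty columns := by
  have hD : (PySem.Set.ofList columns).Nodup := PySem.Set.nodup_ofList columns
  have hb : ∀ i, i < 16 →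
      (PySem.Set.ofList columns).filter (fun c => decide (rkFun c = i))
        = if pvPreferred.getD i "" ∈ columns then [pvPreferred.getD i ""] else [] := by
    intro i hi
    have hpred : ∀ c, decide (rkFun c = i) = (c == pvPreferred.getD i "") := by
      intro c
      by_cases hce : c = pvPreferred.getD i ""
      · subst hce
        rw [rk_getD i hi]
        simp
      · have hd1 : decide (rkFun c = i) = false := by
          simp only [decide_eq_false_iff_not]
          exact fun hr => hce (rk_inv c i hi hr)
        have hd2 : (c == pvPreferred.getD i "") = false := by
          simp only [beq_eq_false_iff_ne]; exact hce
        rw [hd1, hd2]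
    rw [List.filter_congr (fun c _ => hpred c), filter_beq_of_nodup _ hD]
    by_cases hmem : pvPreferred.getD i "" ∈ columns
    · rw [if_pos ((PySem.Set.mem_ofList columns _).mpr hmem), if_pos hmem]
    · rw [if_neg (fun hx => hmem ((PySem.Set.mem_ofList columns _).mp hx)), if_neg hmem]
  have h16 : (PySem.Set.ofList columns).filter (fun c => decide (rkFun c = 16))
      = npDedup PySem.Set.empty columns := by
    rw [npDedup_eq_filter_dd]
    have hdd : dd PySem.Set.empty columns = PySem.Set.ofList columns := by
      have hu := update_eq_dd columns PySem.Set.empty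
      rw [PySem.Set.ofList_eq_foldl]
      simpa [PySem.Set.empty] using hu.symm
    rw [hdd]
    apply List.filter_congr
    intro c _
    by_cases hmem : c ∈ pvPreferred
    · have : ¬ (rkFun c = 16) := fun hr => ((rk_eq16_iff c).mp hr) hmem
      simp [this, hmem]
    · simp [(rk_eq16_iff c).mpr hmem, hmem]
  have hsplit : ∀ (a : String) (l : List String),
      List.filter (fun column => columns.contains column) (a :: l)
        = (if a ∈ columns then [a] else []) ++ List.filter (fun column => columns.contains column) l := by
    intro a l
    by_cases hmem : a ∈ columns <;> simp [List.filter_cons, hmem]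
  unfold bucketsSpec
  rw [show List.range 17 = [0,1,2,3,4,5,6,7,8,9,10,11,12,13,14,15,16] from rfl]
  simp only [List.map_cons, List.map_nil, List.flatten_cons, List.flatten_nil]
  have hb0 := hb 0 (by norm_num)
  rw [show pvPreferred.getD 0 "" = "underlying" from rfl] at hb0
  have hb1 := hb 1 (by norm_num)
  rw [show pvPreferred.getD 1 "" = "option_code" from rfl] at hb1
  have hb2 := hb 2 (by norm_num)
  rw [show pvPreferred.getD 2 "" = "code" from rfl] at hb2
  have hb3 := hb 3 (by norm_num)
  rw [show pvPreferred.getD 3 "" = "name" from rfl] at hb3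
  have hb4 := hb 4 (by norm_num)
  rw [show pvPreferred.getD 4 "" = "expiry" from rfl] at hb4
  have hb5 := hb 5 (by norm_num)
  rw [show pvPreferred.getD 5 "" = "option_type" from rfl] at hb5
  have hb6 := hb 6 (by norm_num)
  rw [show pvPreferred.getD 6 "" = "strike_price" from rfl] at hb6
  have hb7 := hb 7 (by norm_num)
  rw [show pvPreferred.getD 7 "" = "time_key" from rfl] at hb7
  have hb8 := hb 8 (by norm_num)
  rw [show pvPreferred.getD 8 "" = "open" from rfl] at hb8
  have hb9 := hb 9 (by norm_num)
  rw [show pvPreferred.getD 9 "" = "high" from rfl] at hb9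
  have hb10 := hb 10 (by norm_num)
  rw [show pvPreferred.getD 10 "" = "low" from rfl] at hb10
  have hb11 := hb 11 (by norm_num)
  rw [show pvPreferred.getD 11 "" = "close" from rfl] at hb11
  have hb12 := hb 12 (by norm_num)
  rw [show pvPreferred.getD 12 "" = "volume" from rfl] at hb12
  have hb13 := hb 13 (by norm_num)
  rw [show pvPreferred.getD 13 "" = "turnover" from rfl] at hb13
  have hb14 := hb 14 (by norm_num)
  rw [show pvPreferred.getD 14 "" = "change_rate" from rfl] at hb14
  have hb15 := hb 15 (by norm_num)
  rw [show pvPreferred.getD 15 "" = "last_close" from rfl] at hb15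
  rw [hb0, hb1, hb2, hb3, hb4, hb5, hb6, hb7, hb8, hb9, hb10, hb11, hb12, hb13, hb14, hb15, h16]
  rw [show (pvPreferred : List String)
      = ["underlying","option_code","code","name","expiry","option_type","strike_price","time_key",
         "open","high","low","close","volume","turnover","change_rate","last_close"] from rfl]
  simp only [hsplit, List.filter_nil]
  simp only [List.append_assoc, List.append_nil, List.nil_append]

-- ===== VERDICT (by name: the statement is the Claim_ definition above) =====
theorem preferred_history_order_py_spec : Claim_equal_preferred_history_order_py := by
  intro columns _
  unfold Spec_preferred_history_order_py
  have hA : preferred_history_order_py columns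
      = pvPreferred.filter (fun column => columns.contains column)
        ++ npDedup PySem.Set.empty columns := by
    apply foldA columns (pvPreferred.filter (fun column => columns.contains column)) PySem.Set.empty
    intro c hc
    have hcc : columns.contains c = true := by simp [hc]
    simp [List.mem_filter, hcc, PySem.Set.empty, hc]
  have hB : preferred_history_order_py_alt columns
      = (bucketsSpec columns).flatten := by
    have h0 : preferred_history_order_py_alt columns
        = ((columns.foldl
            (fun (st : PySem.Set String × List (List String)) column =>
              if PySem.Set.contains st.1 column then st
              else (PySem.Set.add st.1 column,
                    st.2.modify (rkFun column) (fun b => b ++ [column])))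
            (PySem.Set.ofList [], bucketsSpec [])).2).foldl (fun out bucket => out ++ bucket) [] := rfl
    rw [h0, foldB_inv columns []]
    simp [PySem.List.foldl_append_eq_flatten]
  rw [hA, hB, flatten_buckets]
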